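-- pv_equiv track=rewrite | github.com/titonbarua/sphotik | sphotik/history.py | _split_trailing_punctuations_from_text
-- ===== SOURCE A (Python) =====
-- def _split_trailing_punctuations_from_text(text, puncs):
--     split_at = len(text)
--     for c in reversed(text):
--         if c in puncs:
--             split_at += -1
--         else:
--             break
--
--     return text[:split_at], text[split_at:]
-- ===== SOURCE B (Python) =====
-- def _split_trailing_punctuations_from_text(text, puncs):
--     # Forward single pass: split point = 1 + position of the last
--     # character that is not a punctuation (0 if every char is one).
--     split_at = 0
--     for i, c in enumerate(text):
--         if c not in puncs:
--             split_at = i + 1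
--     return text[:split_at], text[split_at:]
-- ===== Notes on version B (the rewrite author's own statement) =====
-- stated objective: alternative
-- what changed: A scans the text backwards from the end with an early break, decrementing a split index; B makes one forward pass over enumerate(text) recording the position after the last non-punctuation character, with no reverse traversal and no break.
import Mathlib
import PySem

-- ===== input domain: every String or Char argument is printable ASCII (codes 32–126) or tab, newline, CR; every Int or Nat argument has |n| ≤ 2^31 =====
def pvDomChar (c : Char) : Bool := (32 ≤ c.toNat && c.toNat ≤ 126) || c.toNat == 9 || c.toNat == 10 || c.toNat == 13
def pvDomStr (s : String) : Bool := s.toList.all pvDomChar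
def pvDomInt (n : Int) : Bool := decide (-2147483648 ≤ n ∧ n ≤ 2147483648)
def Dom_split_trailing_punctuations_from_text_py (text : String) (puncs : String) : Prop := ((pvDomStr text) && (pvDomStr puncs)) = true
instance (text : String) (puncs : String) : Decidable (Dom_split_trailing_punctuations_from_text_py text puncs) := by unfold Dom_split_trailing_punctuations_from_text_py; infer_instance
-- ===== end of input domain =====

-- B replaces A's backward scan-with-break by one forward pass over enumerate(text)
-- recording the position after the last non-punctuation char; alternative, same cost.

-- ===== PORT A =====
-- the 'for c in reversed(text): if c in puncs: split_at += -1 else: break' loop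
def pvScanA (cs : List Char) (puncs : String) (split_at : Int) : Int :=
  match cs with
  | [] => split_at
  | c :: rest =>
    if puncs.toList.contains c then  -- 'c in puncs' for a single char = membership
      pvScanA rest puncs (split_at + (-1))
    else split_at  -- break

def split_trailing_punctuations_from_text_py (text : String) (puncs : String) : String × String :=
  let split_at : Int := PySem.Str.len text
  let split_at := pvScanA text.toList.reverse puncs split_at
  (PySem.Str.slice text none (some split_at), PySem.Str.slice text (some split_at) none)

-- ===== PORT B =====
-- the 'for i, c in enumerate(text): if c not in puncs: split_at = i + 1' loop
def pvScanB (pairs : List (Int × Char)) (puncs : String) (split_at : Int) : Int :=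
  pairs.foldl (fun acc p => if !(puncs.toList.contains p.2) then p.1 + 1 else acc) split_at

def split_trailing_punctuations_from_text_py_alt (text : String) (puncs : String) : String × String :=
  let split_at := pvScanB (PySem.List.enumerate text.toList 0) puncs 0
  (PySem.Str.slice text none (some split_at), PySem.Str.slice text (some split_at) none)

-- ===== PRECONDITION & SPEC =====
def Spec_split_trailing_punctuations_from_text_py (text : String) (puncs : String) (out : String × String) : Prop := out = split_trailing_punctuations_from_text_py_alt text puncs
instance (text : String) (puncs : String) (out : String × String) : Decidable (Spec_split_trailing_punctuations_from_text_py text puncs out) := by unfold Spec_split_trailing_punctuations_from_text_py; infer_instance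

-- ===== CLAIM =====
def Claim_equal_split_trailing_punctuations_from_text_py : Prop := ∀ (text : String) (puncs : String), Dom_split_trailing_punctuations_from_text_py text puncs → Spec_split_trailing_punctuations_from_text_py text puncs (split_trailing_punctuations_from_text_py text puncs)

-- ===== LEMMAS AND PROOFS =====
theorem pvScanA_eq (cs : List Char) (puncs : String) (k : Int) :
    pvScanA cs puncs k = k - (cs.takeWhile (fun c => puncs.toList.contains c)).length := by
  induction cs generalizing k with
  | nil => simp [pvScanA]
  | cons c rest ih =>
    by_cases h : c ∈ puncs.toList
    · simp [pvScanA, h, ih]; omega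
    · simp [pvScanA, h]

theorem pvScanB_eq (cs : List Char) (puncs : String) :
    pvScanB (PySem.List.enumerate cs 0) puncs 0
      = (cs.length : Int) - ((cs.reverse.takeWhile (fun c => puncs.toList.contains c)).length : Int) := by
  induction cs using List.reverseRecOn with
  | nil => simp [pvScanB]
  | append_singleton ys c ih =>
    rw [PySem.List.enumerate_append]
    unfold pvScanB at ih ⊢
    rw [List.foldl_append]
    simp only [PySem.List.enumerate_cons, PySem.List.enumerate_nil, List.foldl_cons, List.foldl_nil,
      List.reverse_append, List.reverse_cons, List.reverse_nil, List.nil_append,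
      List.singleton_append, List.takeWhile_cons, List.length_append]
    rw [ih]
    simp only [List.contains_eq_mem]
    by_cases h : c ∈ puncs.toList
    · have hle : (List.takeWhile (fun c => decide (c ∈ puncs.toList)) ys.reverse).length ≤ ys.length := by
        simpa using (List.takeWhile_sublist
          (p := fun c => decide (c ∈ puncs.toList)) (l := ys.reverse)).length_le
      simp [h]
    · simp [h]

-- ===== VERDICT =====
theorem split_trailing_punctuations_from_text_py_spec : Claim_equal_split_trailing_punctuations_from_text_py := by
  intro text puncs _
  unfold Spec_split_trailing_punctuations_from_text_py
  unfold split_trailing_punctuations_from_text_py split_trailing_punctuations_from_text_py_alt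
  simp only [pvScanA_eq, pvScanB_eq, PySem.Str.len]
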